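-- pv_equiv track=rewrite | github.com/beg-lezzz/Python_Seminars | Seminar004/HomeWork/Task005.py | sum_of_dict
-- ===== SOURCE A (Python) =====
-- def sum_of_dict(input_list):
--     result_dict = {}
--     for dict in input_list:
--         for i in dict:
--             try:
--                 result_dict[i] += dict[i]
--             except KeyError:
--                 result_dict[i] = dict[i]
--
--     return sorted(result_dict.items())
-- ===== SOURCE B (Python) =====
-- def sum_of_dict(input_list):
--     pairs = []
--     for d in input_list:
--         pairs.extend(d.items())
--     pairs.sort(key=lambda p: p[0])
--     result = []
--     i = 0
--     n = len(pairs)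
--     while i < n:
--         key, total = pairs[i]
--         i += 1
--         while i < n and pairs[i][0] == key:
--             total += pairs[i][1]
--             i += 1
--         result.append((key, total))
--     return result
-- ===== Notes on version B (the rewrite author's own statement) =====
-- stated objective: alternative
-- what changed: Replaces dict aggregation (try/except accumulate per key, then sort the items) by flatten-all-pairs, one stable sort by key, and a single linear coalescing scan that sums adjacent equal-key runs.
import Mathlib
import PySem

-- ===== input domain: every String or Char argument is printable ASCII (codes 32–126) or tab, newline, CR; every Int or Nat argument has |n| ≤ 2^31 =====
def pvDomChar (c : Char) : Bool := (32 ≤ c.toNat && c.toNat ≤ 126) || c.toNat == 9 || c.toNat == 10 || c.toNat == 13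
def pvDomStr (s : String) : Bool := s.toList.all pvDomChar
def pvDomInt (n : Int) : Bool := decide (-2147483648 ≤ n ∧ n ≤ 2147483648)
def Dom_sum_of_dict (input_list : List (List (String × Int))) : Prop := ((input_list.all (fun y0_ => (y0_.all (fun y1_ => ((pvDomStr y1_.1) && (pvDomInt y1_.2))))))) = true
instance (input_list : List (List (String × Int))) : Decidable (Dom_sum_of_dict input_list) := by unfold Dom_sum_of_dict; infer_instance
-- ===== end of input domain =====

-- B replaces A's dict aggregation + sort by flatten, one stable sort by key, and a linear
-- coalescing scan over adjacent equal-key runs (objective: alternative decomposition).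

-- ===== PORT A =====
-- 'try: rd[i] += d[i] except KeyError: rd[i] = d[i]' is rd[i] = rd.get(i, 0) + d[i], i.e. Dict.modify i 0 (· + d[i]).
-- 'sorted(result_dict.items())' compares (str, int) tuples lexicographically: PySem.List.sorted2.
def sum_of_dict (input_list : List (List (String × Int))) : List (String × Int) :=
  let result_dict : PySem.Dict String Int :=
    input_list.foldl
      (fun rd d => d.foldl (fun rd p => rd.modify p.1 0 (· + p.2)) rd)
      PySem.Dict.empty
  PySem.List.sorted2 result_dict.items (fun p => p.1) (fun p => p.2)

-- ===== PORT B =====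
-- the inner 'while i < n and pairs[i][0] == key: total += pairs[i][1]; i += 1' loop
def pvGroup (k : String) (tot : Int) : List (String × Int) → Int × List (String × Int)
  | [] => (tot, [])
  | (k', v) :: rest =>
      if k' == k then pvGroup k (tot + v) rest else (tot, (k', v) :: rest)

theorem pvGroup_snd_length (k : String) (tot : Int) (l : List (String × Int)) :
    (pvGroup k tot l).2.length ≤ l.length := by
  induction l generalizing tot with
  | nil => simp [pvGroup]
  | cons p rest ih =>
    obtain ⟨k', v⟩ := p
    simp only [pvGroup]
    split
    · exact Nat.le_succ_of_le (ih _)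
    · simp

-- the outer 'while i < n: … result.append((key, total))' loop
def pvCoalesce : List (String × Int) → List (String × Int)
  | [] => []
  | (k, v) :: rest =>
      let r := pvGroup k v rest
      (k, r.1) :: pvCoalesce r.2
termination_by l => l.length
decreasing_by
  exact Nat.lt_succ_of_le (pvGroup_snd_length _ _ _)

def sum_of_dict_alt (input_list : List (List (String × Int))) : List (String × Int) :=
  let pairs := input_list.foldl (fun acc d => acc ++ d) []
  let sortedPairs := PySem.List.sorted pairs (fun p => p.1)
  pvCoalesce sortedPairs

-- ===== PRECONDITION & SPEC =====
def Spec_sum_of_dict (input_list : List (List (String × Int))) (out : List (String × Int)) : Prop := out = sum_of_dict_alt input_list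
instance (input_list : List (List (String × Int))) (out : List (String × Int)) : Decidable (Spec_sum_of_dict input_list out) := by unfold Spec_sum_of_dict; infer_instance

-- ===== CLAIM (what is proved, stated in full; the proofs are below) =====
def Claim_equal_sum_of_dict : Prop := ∀ (input_list : List (List (String × Int))), Dom_sum_of_dict input_list → Spec_sum_of_dict input_list (sum_of_dict input_list)

-- ===== LEMMAS AND PROOFS =====

-- abbreviation for the aggregation step of port A
def pvStep (rd : PySem.Dict String Int) (p : String × Int) : PySem.Dict String Int :=
  rd.modify p.1 0 (· + p.2)

-- total value attached to key k in a pair list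
def pvTot (l : List (String × Int)) (k : String) : Int :=
  ((l.filter (fun p => p.1 == k)).map (fun p => p.2)).sum

theorem pv_flatten (L : List (List (String × Int))) (acc : List (String × Int)) :
    L.foldl (fun acc d => acc ++ d) acc = acc ++ L.flatMap id := by
  induction L generalizing acc with
  | nil => simp
  | cons d L ih => simp [ih, List.flatMap_cons]

theorem pv_foldl_nested (L : List (List (String × Int))) (d : PySem.Dict String Int) :
    L.foldl (fun rd l => l.foldl pvStep rd) d = (L.flatMap id).foldl pvStep d := by
  induction L generalizing d with
  | nil => simp
  | cons l L ih => simp [List.flatMap_cons, List.foldl_append, ih]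

theorem pv_getD (l : List (String × Int)) (d : PySem.Dict String Int) (k : String) :
    (l.foldl pvStep d).getD k 0 = d.getD k 0 + pvTot l k := by
  induction l generalizing d with
  | nil => simp [pvTot]
  | cons p l ih =>
    obtain ⟨k', v⟩ := p
    simp only [List.foldl_cons, ih, pvStep, pvTot, List.filter_cons]
    by_cases h : k = k'
    · subst h
      simp [add_assoc]
    · have : ¬ ((k', v).1 == k) = true := by simp [Ne.symm h]
      simp [PySem.Dict.getD_modify, h, this]

-- ===== insertBy machinery: sorted2 on pairwise-distinct first components is sorted by key =====
theorem pv_insertBy_congr {α : Type} (p q : α → α → Bool) (x : α) (acc : List α)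
    (h : ∀ b ∈ acc, p x b = q x b) :
    PySem.List.insertBy p x acc = PySem.List.insertBy q x acc := by
  induction acc with
  | nil => rfl
  | cons y ys ih =>
    simp only [PySem.List.insertBy]
    rw [h y (by simp)]
    split
    · rfl
    · rw [ih (fun b hb => h b (by simp [hb]))]

theorem pv_foldl_insertBy_congr {α : Type} (p q : α → α → Bool) (S : List α)
    (h : ∀ a ∈ S, ∀ b ∈ S, p a b = q a b) :
    ∀ (xs acc : List α), (∀ a ∈ xs, a ∈ S) → (∀ a ∈ acc, a ∈ S) →
      xs.foldl (fun acc x => PySem.List.insertBy p x acc) acc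
        = xs.foldl (fun acc x => PySem.List.insertBy q x acc) acc := by
  intro xs
  induction xs with
  | nil => intro acc _ _; rfl
  | cons x xs ih =>
    intro acc hxs hacc
    simp only [List.foldl_cons]
    rw [pv_insertBy_congr p q x acc (fun b hb => h x (hxs x (by simp)) b (hacc b hb))]
    exact ih _ (fun a ha => hxs a (by simp [ha]))
      (fun a ha => by
        rcases (PySem.List.mem_insertBy q x a acc).1 ha with rfl | ha
        · exact hxs a (by simp)
        · exact hacc a ha)

theorem pv_sorted2_eq_sorted (xs : List (String × Int))
    (h : ∀ a ∈ xs, ∀ b ∈ xs, a.1 = b.1 → a = b) :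
    PySem.List.sorted2 xs (fun p => p.1) (fun p => p.2)
      = PySem.List.sorted xs (fun p => p.1) := by
  show xs.foldl (fun acc x => PySem.List.insertBy _ x acc) []
      = xs.foldl (fun acc x => PySem.List.insertBy _ x acc) []
  apply pv_foldl_insertBy_congr _ _ xs _ xs [] (fun a ha => ha) (by simp)
  intro a ha b hb
  rcases lt_trichotomy a.1 b.1 with hlt | heq | hgt
  · simp [hlt]
  · have : a = b := h a ha b hb heq
    subst this
    simp
  · simp [hgt, not_lt.2 (le_of_lt hgt)]

-- ===== sorted commutes with (k ↦ (k, g k)) =====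
theorem pv_insertBy_map (g : String → Int) (x : String) (acc : List String) :
    PySem.List.insertBy (fun a b : String × Int => decide (a.1 < b.1)) (x, g x)
        (acc.map (fun k => (k, g k)))
      = (PySem.List.insertBy (fun a b : String => decide (a < b)) x acc).map (fun k => (k, g k)) := by
  induction acc with
  | nil => rfl
  | cons y ys ih =>
    simp only [List.map_cons, PySem.List.insertBy]
    split
    · rfl
    · simp only [List.map_cons, ih]

theorem pv_sorted_map (g : String → Int) (S : List String) :
    PySem.List.sorted (S.map (fun k => (k, g k))) (fun p => p.1)
      = (PySem.List.sorted S (fun k => k)).map (fun k => (k, g k)) := by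
  show (S.map (fun k => (k, g k))).foldl (fun acc x => PySem.List.insertBy _ x acc) []
      = (S.foldl (fun acc x => PySem.List.insertBy _ x acc) []).map (fun k => (k, g k))
  have : ∀ (acc : List String),
      (S.map (fun k => (k, g k))).foldl
          (fun acc x => PySem.List.insertBy (fun a b : String × Int => decide (a.1 < b.1)) x acc)
          (acc.map (fun k => (k, g k)))
        = (S.foldl (fun acc x => PySem.List.insertBy (fun a b : String => decide (a < b)) x acc) acc).map
            (fun k => (k, g k)) := by
    induction S with
    | nil => intro acc; rfl
    | cons s S ih =>
      intro acc
      simp only [List.map_cons, List.foldl_cons]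
      rw [pv_insertBy_map g s acc, ih]
  simpa using this []

-- ===== Set.ofList helpers =====
theorem pv_ofList_sublist {α : Type} [BEq α] [LawfulBEq α] (xs : List α) :
    (PySem.Set.ofList xs).Sublist xs := by
  induction xs with
  | nil => simp [PySem.Set.ofList_nil]
  | cons x xs ih =>
    rw [PySem.Set.ofList_cons]
    refine List.Sublist.cons₂ x ?_
    have hd : (PySem.Set.ofList xs).discard x
        = (PySem.Set.ofList xs).filter (fun y => !(y == x)) := rfl
    rw [hd]
    exact List.filter_sublist.trans ih

theorem pv_discard_ofList {α : Type} [BEq α] [LawfulBEq α] (xs : List α) (k : α) :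
    (PySem.Set.ofList xs).discard k = PySem.Set.ofList (xs.filter (fun y => !(y == k))) := by
  induction xs with
  | nil => rfl
  | cons x xs ih =>
    rw [PySem.Set.ofList_cons, List.filter_cons]
    by_cases hx : (x == k) = true
    · have hxk : x = k := by simpa using hx
      subst hxk
      rw [if_neg (by simp)]
      have h1 : PySem.Set.discard (x :: (PySem.Set.ofList xs).discard x) x
          = ((PySem.Set.ofList xs).discard x).filter (fun y => !(y == x)) := by
        show List.filter _ (x :: _) = _
        rw [List.filter_cons, if_neg (by simp)]
      rw [h1, ih]
      apply List.filter_eq_self.2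
      intro y hy
      have hy' := (PySem.Set.mem_ofList _ _).1 hy
      exact (List.mem_filter.1 hy').2
    · rw [if_pos (by simp [hx])]
      rw [PySem.Set.ofList_cons]
      have h1 : PySem.Set.discard (x :: (PySem.Set.ofList xs).discard x) k
          = x :: ((PySem.Set.ofList xs).discard x).filter (fun y => !(y == k)) := by
        show List.filter _ (x :: _) = _
        rw [List.filter_cons, if_pos (by simp [hx])]
      rw [h1]
      congr 1
      show ((PySem.Set.ofList xs).filter (fun y => !(y == x))).filter (fun y => !(y == k))
          = (PySem.Set.ofList (xs.filter (fun y => !(y == k)))).filter (fun y => !(y == x))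
      rw [← ih]
      show _ = ((PySem.Set.ofList xs).filter (fun y => !(y == k))).filter (fun y => !(y == x))
      rw [List.filter_filter, List.filter_filter]
      congr 1
      funext y
      rw [Bool.and_comm]

theorem pv_dropWhile_head {α : Type} (p : α → Bool) (l : List α) :
    ∀ x xs, l.dropWhile p = x :: xs → p x = false := by
  induction l with
  | nil => intro x xs h; simp at h
  | cons y l ih =>
    intro x xs h
    rw [List.dropWhile_cons] at h
    split at h
    · exact ih x xs h
    · cases h; simp_all

-- ===== pvGroup / pvCoalesce characterisation =====
theorem pv_pvGroup_eq (k : String) (t : Int) (l : List (String × Int)) :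
    pvGroup k t l
      = (t + ((l.takeWhile (fun p => p.1 == k)).map (fun p => p.2)).sum,
         l.dropWhile (fun p => p.1 == k)) := by
  induction l generalizing t with
  | nil => simp [pvGroup]
  | cons p rest ih =>
    obtain ⟨k', v⟩ := p
    by_cases h : (k' == k) = true
    · simp [pvGroup, h, ih, add_assoc]
    · simp [pvGroup, h]

theorem pv_pvCoalesce_spec (T : List (String × Int))
    (hp : T.Pairwise (fun a b => a.1 ≤ b.1)) :
    pvCoalesce T
      = (PySem.Set.ofList (T.map (fun p => p.1))).map (fun k => (k, pvTot T k)) := by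
  induction T using pvCoalesce.induct with
  | case1 => simp [pvCoalesce, pvTot]
  | case2 k v rest rgrp =>
    rename_i ih
    rw [List.pairwise_cons] at hp
    obtain ⟨hle, hprest⟩ := hp
    have hr : pvGroup k v rest
        = (v + ((rest.takeWhile (fun p => p.1 == k)).map (fun p => p.2)).sum,
           rest.dropWhile (fun p => p.1 == k)) := pv_pvGroup_eq k v rest
    set f : String × Int → Bool := fun p => p.1 == k with hf
    have hg : ∀ p ∈ rest.takeWhile f, p.1 = k := by
      intro p hpmem
      have := List.mem_takeWhile_imp hpmem
      simpa [hf] using this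
    have hrw : rgrp.2 = rest.dropWhile f := by
      show (pvGroup k v rest).2 = _
      rw [hr]
    have hrsub : (rest.dropWhile f).Sublist rest := List.dropWhile_sublist f
    have hpr : (rest.dropWhile f).Pairwise (fun a b => a.1 ≤ b.1) :=
      hprest.sublist hrsub
    have hrk : ∀ p ∈ rest.dropWhile f, k < p.1 := by
      cases hd : rest.dropWhile f with
      | nil => intro p hpmem; simp at hpmem
      | cons h t =>
        have hhf : f h = false := pv_dropWhile_head f rest h t hd
        have hhmem : h ∈ rest := hrsub.mem (by simp [hd])
        have hkh : k < h.1 := by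
          rcases lt_or_eq_of_le (hle h hhmem) with h1 | h1
          · exact h1
          · exfalso; simp [hf, h1.symm] at hhf
        intro p hpmem
        rcases List.mem_cons.1 hpmem with rfl | hpmem
        · exact hkh
        · have : h.1 ≤ p.1 := by
            rw [hd] at hpr
            exact (List.pairwise_cons.1 hpr).1 p hpmem
          exact lt_of_lt_of_le hkh this
    -- decompose rest as takeWhile ++ dropWhile
    have hsplit : rest.takeWhile f ++ rest.dropWhile f = rest :=
      List.takeWhile_append_dropWhile
    -- the filter of rest at key k is exactly the takeWhile group
    have hfk : rest.filter (fun p => p.1 == k) = rest.takeWhile f := by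
      conv_lhs => rw [← hsplit]
      rw [List.filter_append]
      have h1 : (rest.takeWhile f).filter (fun p => p.1 == k) = rest.takeWhile f := by
        rw [List.filter_eq_self]
        intro p hpmem
        simp [hg p hpmem]
      have h2 : (rest.dropWhile f).filter (fun p => p.1 == k) = [] := by
        rw [List.filter_eq_nil_iff]
        intro p hpmem
        simp [ne_of_gt (hrk p hpmem)]
      rw [h1, h2, List.append_nil]
    -- keys of the tail set
    have hkeys : (PySem.Set.ofList (((k, v) :: rest).map (fun p => p.1)))
        = k :: PySem.Set.ofList ((rest.dropWhile f).map (fun p => p.1)) := by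
      rw [List.map_cons, PySem.Set.ofList_cons, pv_discard_ofList]
      congr 2
      conv_lhs => rw [← hsplit]
      rw [List.map_append, List.filter_append]
      have h1 : ((rest.takeWhile f).map (fun p => p.1)).filter (fun y => !(y == k)) = [] := by
        rw [List.filter_eq_nil_iff]
        intro a ha
        rcases List.mem_map.1 ha with ⟨p, hpmem, rfl⟩
        simp [hg p hpmem]
      have h2 : ((rest.dropWhile f).map (fun p => p.1)).filter (fun y => !(y == k))
          = (rest.dropWhile f).map (fun p => p.1) := by
        rw [List.filter_eq_self]
        intro a ha
        rcases List.mem_map.1 ha with ⟨p, hpmem, rfl⟩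
        simp [ne_of_gt (hrk p hpmem)]
      rw [h1, h2, List.nil_append]
    -- head total
    have hhead : pvTot ((k, v) :: rest) k = v + ((rest.takeWhile f).map (fun p => p.2)).sum := by
      unfold pvTot
      rw [List.filter_cons, if_pos (by simp), hfk, List.map_cons, List.sum_cons]
    -- tail totals agree
    have htail : ∀ k' ∈ PySem.Set.ofList ((rest.dropWhile f).map (fun p => p.1)),
        pvTot (rest.dropWhile f) k' = pvTot ((k, v) :: rest) k' := by
      intro k' hk'
      have hk'mem : k' ∈ (rest.dropWhile f).map (fun p => p.1) :=
        (PySem.Set.mem_ofList _ _).1 hk'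
      rcases List.mem_map.1 hk'mem with ⟨q, hqmem, rfl⟩
      have hkq : k < q.1 := hrk q hqmem
      unfold pvTot
      rw [List.filter_cons, if_neg (by simpa using ne_of_lt hkq)]
      congr 2
      conv_rhs => rw [← hsplit]
      rw [List.filter_append]
      have h1 : (rest.takeWhile f).filter (fun p => p.1 == q.1) = [] := by
        rw [List.filter_eq_nil_iff]
        intro p hpmem
        have := hg p hpmem
        simp [this, ne_of_lt hkq]
      rw [h1, List.nil_append]
    -- assemble
    rw [pvCoalesce]
    rw [hkeys, List.map_cons, hhead]
    have hfst : (pvGroup k v rest).1 = v + ((rest.takeWhile f).map (fun p => p.2)).sum := by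
      rw [hr]
    rw [hfst]
    congr 1
    have hih := ih (hrw ▸ hpr)
    rw [hrw] at hih
    have h2 : (pvCoalesce (pvGroup k v rest).2) = pvCoalesce (rest.dropWhile f) := by
      rw [show (pvGroup k v rest).2 = rest.dropWhile f from by rw [hr]]
    rw [h2, hih]
    exact List.map_congr_left (fun k' hk' => by rw [htail k' hk'])

theorem pv_main (input_list : List (List (String × Int))) :
    sum_of_dict input_list = sum_of_dict_alt input_list := by
  -- names for the flattened pair list, A's dict, B's sorted run
  set F : List (String × Int) := input_list.flatMap id with hF
  set D : PySem.Dict String Int := F.foldl pvStep PySem.Dict.empty with hD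
  set T : List (String × Int) := PySem.List.sorted F (fun p => p.1) with hT
  -- A's port in terms of D
  have hA : sum_of_dict input_list
      = PySem.List.sorted2 D.items (fun p => p.1) (fun p => p.2) := by
    unfold sum_of_dict
    rw [show (fun (rd : PySem.Dict String Int) (d : List (String × Int)) =>
          d.foldl (fun rd p => rd.modify p.1 0 (· + p.2)) rd)
        = (fun (rd : PySem.Dict String Int) (d : List (String × Int)) => d.foldl pvStep rd)
        from rfl]
    rw [pv_foldl_nested]
  -- B's port in terms of T
  have hB : sum_of_dict_alt input_list = pvCoalesce T := by
    unfold sum_of_dict_alt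
    rw [pv_flatten, List.nil_append]
  -- A's dict: keys and totals
  have hkeys : D.keys = PySem.Set.ofList (F.map (fun p => p.1)) := by
    have h := PySem.Dict.keys_foldl_modify_key (l := F)
      (key := fun p : String × Int => p.1) (d0 := (0 : Int))
      (f := fun _ p => (· + p.2)) (d := PySem.Dict.empty)
    rw [PySem.Dict.keys_empty, PySem.Set.update_nil_left] at h
    exact h
  have hnd : D.keys.Nodup := by
    have h := PySem.Dict.nodup_keys_foldl_modify_key (l := F)
      (key := fun p : String × Int => p.1) (d0 := (0 : Int))
      (f := fun _ p => (· + p.2)) (d := PySem.Dict.empty)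
      (by rw [PySem.Dict.keys_empty]; exact List.nodup_nil)
    exact h
  have hgetD : ∀ k, D.getD k 0 = pvTot F k := by
    intro k
    rw [hD, pv_getD, PySem.Dict.getD_empty, zero_add]
  have hitems : D.items
      = (PySem.Set.ofList (F.map (fun p => p.1))).map (fun k => (k, pvTot F k)) := by
    rw [PySem.Dict.items_eq_map_keys D hnd 0, hkeys]
    exact List.map_congr_left (fun k _ => by rw [hgetD k])
  -- first components of D.items are pairwise distinguishing
  have hinj : ∀ a ∈ D.items, ∀ b ∈ D.items, a.1 = b.1 → a = b := by
    intro a ha b hb hab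
    rw [hitems] at ha hb
    rcases List.mem_map.1 ha with ⟨ka, _, rfl⟩
    rcases List.mem_map.1 hb with ⟨kb, _, rfl⟩
    simp only at hab
    rw [hab]
  -- T's key list is sorted, its pair multiset is F's
  have hTperm : T.Perm F := PySem.List.sorted_perm F (fun p => p.1) false
  have hTpair : T.Pairwise (fun a b => a.1 ≤ b.1) :=
    PySem.List.sorted_pairwise F (fun p => p.1)
  have hTkeypair : (T.map (fun p => p.1)).Pairwise (fun a b => a ≤ b) :=
    PySem.List.sorted_map_key_pairwise F (fun p => p.1)
  -- totals are permutation invariant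
  have htot : ∀ k, pvTot T k = pvTot F k := by
    intro k
    exact ((hTperm.filter (fun p => p.1 == k)).map (fun p => p.2)).sum_eq
  -- the sorted distinct keys of F are exactly the distinct keys of T in order
  have hS : PySem.List.sorted (PySem.Set.ofList (F.map (fun p => p.1))) (fun k => k)
      = PySem.Set.ofList (T.map (fun p => p.1)) := by
    have hperm : (PySem.Set.ofList (F.map (fun p => p.1))).Perm
        (PySem.Set.ofList (T.map (fun p => p.1))) := by
      rw [List.perm_ext_iff_of_nodup (PySem.Set.nodup_ofList _) (PySem.Set.nodup_ofList _)]
      intro a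
      rw [PySem.Set.mem_ofList, PySem.Set.mem_ofList]
      exact ⟨fun h => (hTperm.map (fun p => p.1)).symm.mem_iff.1 h,
             fun h => (hTperm.map (fun p => p.1)).mem_iff.1 h⟩
    rw [PySem.List.sorted_eq_sorted_of_perm _ _ (fun k => k)
      (fun a b h => h) hperm]
    apply PySem.List.sorted_eq_self_of_pairwise
    exact hTkeypair.sublist (pv_ofList_sublist _)
  -- chain the two sides together
  rw [hA, hB, hitems,
    pv_sorted2_eq_sorted _ (by rw [← hitems]; exact hinj),
    pv_sorted_map (pvTot F) _, hS,
    pv_pvCoalesce_spec T hTpair]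
  exact List.map_congr_left (fun k hk => by rw [htot k])

-- ===== VERDICT (by name: the statement is the Claim_ definition above) =====
theorem sum_of_dict_spec : Claim_equal_sum_of_dict := by
  intro input_list _
  unfold Spec_sum_of_dict
  exact pv_main input_list
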